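-- pv_equiv track=rewrite | github.com/t0r1n88/Lachesis | cyberpsychology/kochetkov_dga.py | calc_value_v
-- ===== SOURCE A (Python) =====
-- def calc_value_v(row):
--     """
--     Функция для подсчета значения
--     :return: число
--     """
--     lst_pr = [3,11,19]
--     value_forward = 0  # результат
--     for idx, value in enumerate(row,1):
--         if idx in lst_pr:
--             if idx == 3:
--                 value_forward += value
--             else:
--                 if value == 1:
--                     value_forward += 5
--                 elif value == 2:
--                     value_forward += 4
--                 elif value == 3:
--                     value_forward += 3
--                 elif value == 4:
--                     value_forward += 2
--                 else:
--                     value_forward += 1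
--     return value_forward
-- ===== SOURCE B (Python) =====
-- def calc_value_v(row):
--     def mapped(v):
--         if v == 1:
--             return 5
--         if v == 2:
--             return 4
--         if v == 3:
--             return 3
--         if v == 4:
--             return 2
--         return 1
--
--     total = row[2] if len(row) >= 3 else 0
--     if len(row) >= 11:
--         total += mapped(row[10])
--     if len(row) >= 19:
--         total += mapped(row[18])
--     return total
-- ===== Notes on version B (the rewrite author's own statement) =====
-- stated objective: simpler
-- what changed: Replaces the full enumerate scan of the row with three guarded direct reads of positions 2, 10 and 18 (the 1-based 3/11/19) plus a small mapping helper; no loop at all.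
import Mathlib
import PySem

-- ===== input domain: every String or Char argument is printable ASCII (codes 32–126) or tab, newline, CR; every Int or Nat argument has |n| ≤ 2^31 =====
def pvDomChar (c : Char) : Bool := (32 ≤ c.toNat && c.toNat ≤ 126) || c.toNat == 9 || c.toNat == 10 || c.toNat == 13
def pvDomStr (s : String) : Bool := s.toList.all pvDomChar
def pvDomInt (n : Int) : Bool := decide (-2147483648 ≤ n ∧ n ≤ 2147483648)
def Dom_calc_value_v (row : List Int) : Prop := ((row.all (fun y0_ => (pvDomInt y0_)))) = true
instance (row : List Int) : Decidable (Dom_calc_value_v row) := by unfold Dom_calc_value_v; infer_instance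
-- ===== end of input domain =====

-- B replaces A's enumerate loop over the whole row by three guarded direct reads
-- of positions 2/10/18 (the 1-based 3/11/19): simpler, no loop.

-- ===== PORT A =====
-- the 'for idx, value in enumerate(row, 1)' loop, carrying (idx, value_forward); branch order as in A
def pvLoopA : Int → List Int → Int → Int
  | _, [], acc => acc
  | idx, v :: t, acc =>
    pvLoopA (idx + 1) t
      (if idx = 3 ∨ idx = 11 ∨ idx = 19 then
        (if idx = 3 then acc + v
         else if v = 1 then acc + 5
         else if v = 2 then acc + 4
         else if v = 3 then acc + 3
         else if v = 4 then acc + 2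
         else acc + 1)
       else acc)

def calc_value_v (row : List Int) : Int := pvLoopA 1 row 0

-- ===== PORT B =====
-- B's helper 'mapped'
def pvMapped (v : Int) : Int :=
  if v = 1 then 5
  else if v = 2 then 4
  else if v = 3 then 3
  else if v = 4 then 2
  else 1

def calc_value_v_alt (row : List Int) : Int :=
  let total : Int := if 3 ≤ row.length then ((PySem.List.pyGet? row 2).getD 0) else 0
  let total : Int := if 11 ≤ row.length then total + pvMapped ((PySem.List.pyGet? row 10).getD 0) else total
  if 19 ≤ row.length then total + pvMapped ((PySem.List.pyGet? row 18).getD 0) else total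

-- ===== PRECONDITION & SPEC =====
def Spec_calc_value_v (row : List Int) (out : Int) : Prop := out = calc_value_v_alt row
instance (row : List Int) (out : Int) : Decidable (Spec_calc_value_v row out) := by unfold Spec_calc_value_v; infer_instance

-- ===== CLAIM (what is proved, stated in full; the proofs are below) =====
def Claim_equal_calc_value_v : Prop := ∀ (row : List Int), Dom_calc_value_v row → Spec_calc_value_v row (calc_value_v row)

-- ===== LEMMAS AND PROOFS =====

-- contribution of one element at 1-based position idx in A's loop
def pvC (idx v : Int) : Int :=
  if idx = 3 then v else if idx = 11 ∨ idx = 19 then pvMapped v else 0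

-- the total contribution of the suffix starting at position idx
def pvG : Int → List Int → Int
  | _, [] => 0
  | idx, v :: t => pvC idx v + pvG (idx + 1) t

lemma pvLoopA_eq_pvG : ∀ (t : List Int) (idx acc : Int), pvLoopA idx t acc = acc + pvG idx t := by
  intro t
  induction t with
  | nil => intro idx acc; simp [pvLoopA, pvG]
  | cons v t ih =>
    intro idx acc
    simp only [pvLoopA, pvG]
    rw [ih]
    have h : (if idx = 3 ∨ idx = 11 ∨ idx = 19 then
        (if idx = 3 then acc + v
         else if v = 1 then acc + 5
         else if v = 2 then acc + 4
         else if v = 3 then acc + 3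
         else if v = 4 then acc + 2
         else acc + 1)
       else acc) = acc + pvC idx v := by
      unfold pvC pvMapped
      split_ifs <;> omega
    rw [h]
    ring

-- the contribution of 0-based position k, read directly
def pvP (t : List Int) (n k : Nat) (f : Int → Int) : Int :=
  if n ≤ k ∧ k - n < t.length then f (t.getD (k - n) 0) else 0

lemma pvP_cons (v : Int) (t : List Int) (n k : Nat) (f : Int → Int) :
    pvP (v :: t) n k f = (if n = k then f v else 0) + pvP t (n + 1) k f := by
  by_cases h : n = k
  · subst h
    simp [pvP]
  · by_cases h2 : n < k
    · have hk : k - n = (k - (n + 1)) + 1 := by omega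
      simp only [pvP, List.length_cons, hk, List.getD_cons_succ, if_neg h]
      have hc : (n ≤ k ∧ k - (n + 1) + 1 < t.length + 1) ↔ (n + 1 ≤ k ∧ k - (n + 1) < t.length) := by
        omega
      rw [if_congr hc rfl rfl]
      ring
    · simp only [pvP, if_neg h]
      rw [if_neg (by omega), if_neg (by omega)]
      ring

lemma pvG_eq (t : List Int) : ∀ n : Nat,
    pvG ((n : Int) + 1) t = pvP t n 2 id + pvP t n 10 pvMapped + pvP t n 18 pvMapped := by
  induction t with
  | nil => intro n; simp [pvG, pvP]
  | cons v t ih =>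
    intro n
    simp only [pvG, pvP_cons]
    have hcast : ((n : Int) + 1) + 1 = ((n + 1 : Nat) : Int) + 1 := by push_cast; ring
    rw [hcast, ih (n + 1)]
    have hC : pvC ((n : Int) + 1) v =
        (if n = 2 then id v else 0) + (if n = 10 then pvMapped v else 0) +
          (if n = 18 then pvMapped v else 0) := by
      unfold pvC
      simp only [id]
      have e3 : ((n : Int) + 1 = 3) ↔ (n = 2) := by omega
      have e11 : ((n : Int) + 1 = 11) ↔ (n = 10) := by omega
      have e19 : ((n : Int) + 1 = 19) ↔ (n = 18) := by omega
      simp only [e3, e11, e19]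
      split_ifs <;> omega
    rw [hC]
    ring

-- ===== VERDICT (by name: the statement is the Claim_ definition above) =====
theorem calc_value_v_spec : Claim_equal_calc_value_v := by
  intro row _
  show calc_value_v row = calc_value_v_alt row
  have hA : calc_value_v row = pvP row 0 2 id + pvP row 0 10 pvMapped + pvP row 0 18 pvMapped := by
    unfold calc_value_v
    rw [pvLoopA_eq_pvG]
    have : (1 : Int) = ((0 : Nat) : Int) + 1 := by norm_num
    rw [this, pvG_eq row 0]
    ring
  rw [hA]
  unfold calc_value_v_alt pvP
  simp only [Nat.zero_le, Nat.sub_zero, true_and, id]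
  have g2 : 2 < row.length → (PySem.List.pyGet? row 2).getD 0 = row.getD 2 0 := by
    intro h
    simp [PySem.List.pyGet?, PySem.List.pyIdx?, h, List.getD]
  have g10 : 10 < row.length → (PySem.List.pyGet? row 10).getD 0 = row.getD 10 0 := by
    intro h
    simp [PySem.List.pyGet?, PySem.List.pyIdx?, h, List.getD]
  have g18 : 18 < row.length → (PySem.List.pyGet? row 18).getD 0 = row.getD 18 0 := by
    intro h
    simp [PySem.List.pyGet?, PySem.List.pyIdx?, h, List.getD]
  split_ifs <;>
    first
      | (exfalso; omega)
      | rfl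
      | (rw [g2 (by omega), g10 (by omega), g18 (by omega)])
      | (rw [g2 (by omega), g10 (by omega)] <;> ring)
      | (rw [g2 (by omega)] <;> ring)
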